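-- pv_equiv track=rewrite | github.com/moscars/advent-of-code | day8/p2.py | drawDigit
-- ===== SOURCE A (Python) =====
-- def onlyNums(nums, strip):
--     for i in range(len(strip)):
--         if strip[i] and i not in nums:
--             return False
--
--     for num in nums:
--         if not strip[num]:
--             return False
--     return True
--
-- def drawDigit(used, posIsDigit):
--     strip = [False] * 7
--     for char in used:
--         for i in range(len(posIsDigit)):
--             if char == posIsDigit[i]:
--                 strip[i] = True
--
--     if onlyNums([0, 1, 2, 4, 5, 6], strip):
--         return 0
--     elif onlyNums([2, 5], strip):
--         return 1
--     elif onlyNums([0, 2, 3, 4, 6], strip):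
--         return 2
--     elif onlyNums([0, 2, 3, 5, 6], strip):
--         return 3
--     elif onlyNums([1, 2, 3, 5], strip):
--         return 4
--     elif onlyNums([0, 1, 3, 5, 6], strip):
--         return 5
--     elif onlyNums([0, 1, 3, 4, 5, 6], strip):
--         return 6
--     elif onlyNums([0, 2, 5], strip):
--         return 7
--     elif onlyNums([0, 1, 2, 3, 4, 5, 6], strip):
--         return 8
--     elif onlyNums([0, 1, 2, 3, 5, 6], strip):
--         return 9
-- ===== SOURCE B (Python) =====
-- _LOOKUP = {
--     frozenset({0, 1, 2, 4, 5, 6}): 0,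
--     frozenset({2, 5}): 1,
--     frozenset({0, 2, 3, 4, 6}): 2,
--     frozenset({0, 2, 3, 5, 6}): 3,
--     frozenset({1, 2, 3, 5}): 4,
--     frozenset({0, 1, 3, 5, 6}): 5,
--     frozenset({0, 1, 3, 4, 5, 6}): 6,
--     frozenset({0, 2, 5}): 7,
--     frozenset({0, 1, 2, 3, 4, 5, 6}): 8,
--     frozenset({0, 1, 2, 3, 5, 6}): 9,
-- }
--
-- def drawDigit(used, posIsDigit):
--     active = frozenset(i for i, s in enumerate(posIsDigit)
--                        if len(s) == 1 and s in used)
--     return _LOOKUP.get(active)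
-- ===== Notes on version B (the rewrite author's own statement) =====
-- stated objective: idiomatic
-- what changed: B replaces the per-character marking loop over a mutable 7-bool strip plus ten sequential onlyNums scans by one pass collecting the frozenset of active segment indices and a single lookup in a module-level pattern-to-digit dict.
import Mathlib
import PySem

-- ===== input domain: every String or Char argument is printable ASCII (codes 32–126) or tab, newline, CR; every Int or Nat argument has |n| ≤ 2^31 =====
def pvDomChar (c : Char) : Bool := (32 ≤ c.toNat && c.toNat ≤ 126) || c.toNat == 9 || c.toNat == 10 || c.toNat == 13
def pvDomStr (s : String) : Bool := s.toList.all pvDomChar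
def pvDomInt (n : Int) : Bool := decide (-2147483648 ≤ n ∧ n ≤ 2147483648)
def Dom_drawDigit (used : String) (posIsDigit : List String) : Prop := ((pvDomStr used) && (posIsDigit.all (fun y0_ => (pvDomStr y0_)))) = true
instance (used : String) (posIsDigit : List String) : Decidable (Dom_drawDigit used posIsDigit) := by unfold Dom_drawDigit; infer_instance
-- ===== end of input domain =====

-- B replaces the per-char marking loop plus ten sequential `onlyNums` scans by one pass
-- that collects the set of active segment indices and a single table lookup (objective: idiomatic).

-- ===== PORT A =====
-- literal port of A's onlyNums: first loop returns False on a lit segment outside nums,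
-- second loop returns False on a nums segment that is not lit
def onlyNums (nums : List Nat) (strip : List Bool) : Bool :=
  ((List.range strip.length).all fun i => !(strip.getD i false) || nums.contains i) &&
  (nums.all fun num => strip.getD num false)

-- A's marking loops: for char in used / for i in range(len(posIsDigit)) / strip[i] = True.
-- `posIsDigit.getD i ""` is exact for `posIsDigit[i]` since i ranges over the valid indices;
-- `strip.set i true` is exact for `strip[i] = True` when i < 7 — Pre_drawDigit excludes the
-- inputs where Python reaches the assignment with i ≥ 7 (IndexError).
def pvStrip (used : String) (posIsDigit : List String) : List Bool :=
  used.toList.foldl (fun s c =>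
      (List.range posIsDigit.length).foldl
        (fun s i => if String.ofList [c] == posIsDigit.getD i "" then s.set i true else s) s)
    (List.replicate 7 false)

def drawDigit (used : String) (posIsDigit : List String) : Option Int :=
  let strip := pvStrip used posIsDigit
  if onlyNums [0, 1, 2, 4, 5, 6] strip then some 0
  else if onlyNums [2, 5] strip then some 1
  else if onlyNums [0, 2, 3, 4, 6] strip then some 2
  else if onlyNums [0, 2, 3, 5, 6] strip then some 3
  else if onlyNums [1, 2, 3, 5] strip then some 4
  else if onlyNums [0, 1, 3, 5, 6] strip then some 5
  else if onlyNums [0, 1, 3, 4, 5, 6] strip then some 6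
  else if onlyNums [0, 2, 5] strip then some 7
  else if onlyNums [0, 1, 2, 3, 4, 5, 6] strip then some 8
  else if onlyNums [0, 1, 2, 3, 5, 6] strip then some 9
  else none

-- ===== PORT B =====
-- B's module-level dict mapping frozensets of segment indices to digits; a Python dict with
-- frozenset keys is ported by hand as an association list looked up under set equality.
def pvSegTable : List (List Nat × Int) :=
  [([0, 1, 2, 4, 5, 6], 0), ([2, 5], 1), ([0, 2, 3, 4, 6], 2), ([0, 2, 3, 5, 6], 3),
   ([1, 2, 3, 5], 4), ([0, 1, 3, 5, 6], 5), ([0, 1, 3, 4, 5, 6], 6), ([0, 2, 5], 7),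
   ([0, 1, 2, 3, 4, 5, 6], 8), ([0, 1, 2, 3, 5, 6], 9)]

-- frozenset equality (both operands have no duplicates)
def pvSetEq (a b : List Nat) : Bool := a.all b.contains && b.all a.contains

-- active = frozenset(i for i, s in enumerate(posIsDigit) if len(s) == 1 and s in used);
-- `s in used` for a one-character s is membership of that character in used.
def pvActive (used : String) (posIsDigit : List String) : List Nat :=
  (List.range posIsDigit.length).filter fun i =>
    match (posIsDigit.getD i "").toList with
    | [c] => used.toList.contains c
    | _ => false

def drawDigit_alt (used : String) (posIsDigit : List String) : Option Int :=
  let active := pvActive used posIsDigit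
  (pvSegTable.find? fun e => pvSetEq e.1 active).map (·.2)

-- ===== PRECONDITION & SPEC =====
-- Pre_ excludes exactly the inputs where A raises IndexError: some character of `used`
-- equals the entry of posIsDigit at an index ≥ 7 (Python then executes strip[i] = True with i ≥ 7).
def Pre_drawDigit (used : String) (posIsDigit : List String) : Prop :=
  ((List.range posIsDigit.length).all fun i =>
    !(decide (7 ≤ i)) ||
      used.toList.all fun c => !(posIsDigit.getD i "" == String.ofList [c])) = true

instance (used : String) (posIsDigit : List String) : Decidable (Pre_drawDigit used posIsDigit) := by
  unfold Pre_drawDigit; infer_instance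

def pvWitness_drawDigit : String × List String := ("ab", ["a", "b", "c", "", "x"])

def Spec_drawDigit (used : String) (posIsDigit : List String) (out : Option Int) : Prop := out = drawDigit_alt used posIsDigit
instance (used : String) (posIsDigit : List String) (out : Option Int) : Decidable (Spec_drawDigit used posIsDigit out) := by unfold Spec_drawDigit; infer_instance

-- ===== CLAIM (what is proved, stated in full; the proofs are below) =====
def Claim_equal_drawDigit : Prop := ∀ (used : String) (posIsDigit : List String), Dom_drawDigit used posIsDigit → Pre_drawDigit used posIsDigit → Spec_drawDigit used posIsDigit (drawDigit used posIsDigit)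

-- ===== LEMMAS AND PROOFS =====

-- the j-th segment bit both programs are ultimately about
def pvBit (used : String) (posIsDigit : List String) (j : Nat) : Bool :=
  decide (j < posIsDigit.length) &&
    used.toList.any fun c => String.ofList [c] == posIsDigit.getD j ""

theorem pv_getD_set (l : List Bool) (i j : Nat) (h : j < l.length) (b : Bool) :
    (l.set i b).getD j false = if i = j then b else l.getD j false := by
  rw [List.getD_eq_getElem _ _ (by simpa using h), List.getD_eq_getElem _ _ h, List.getElem_set]

theorem pv_inner_length (cond : Nat → Bool) (m : Nat) (s : List Bool) :
    ((List.range m).foldl (fun s i => if cond i then s.set i true else s) s).length = s.length := by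
  induction m generalizing s with
  | zero => rfl
  | succ m ih =>
      rw [List.range_succ, List.foldl_append, List.foldl_cons, List.foldl_nil]
      split <;> simp [ih]

theorem pv_inner_getD (cond : Nat → Bool) (m : Nat) (s : List Bool) (j : Nat) (h : j < s.length) :
    ((List.range m).foldl (fun s i => if cond i then s.set i true else s) s).getD j false
      = (s.getD j false || (decide (j < m) && cond j)) := by
  induction m with
  | zero => simp
  | succ m ih =>
      rw [List.range_succ, List.foldl_append, List.foldl_cons, List.foldl_nil]
      by_cases hc : cond m = true
      · rw [if_pos hc, pv_getD_set _ _ _ (by rw [pv_inner_length]; exact h), ih]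
        by_cases hj : m = j
        · subst hj; simp [hc]
        · rw [if_neg hj,
              show (decide (j < m + 1)) = decide (j < m) from
                decide_eq_decide.mpr (by omega)]
      · rw [if_neg hc, ih]
        rw [Bool.not_eq_true] at hc
        by_cases hj : j = m
        · subst hj; simp [hc]
        · rw [show (decide (j < m + 1)) = decide (j < m) from
                decide_eq_decide.mpr (by omega)]

theorem pv_outer (pos : List String) (chars : List Char) (s : List Bool) :
    (chars.foldl (fun s c =>
        (List.range pos.length).foldl
          (fun s i => if String.ofList [c] == pos.getD i "" then s.set i true else s) s)
      s).length = s.length ∧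
    ∀ j, j < s.length →
      (chars.foldl (fun s c =>
        (List.range pos.length).foldl
          (fun s i => if String.ofList [c] == pos.getD i "" then s.set i true else s) s)
      s).getD j false
        = (s.getD j false ||
            chars.any fun c => decide (j < pos.length) && (String.ofList [c] == pos.getD j "")) := by
  induction chars generalizing s with
  | nil => simp
  | cons c cs ih =>
      rw [List.foldl_cons]
      obtain ⟨ihl, ihg⟩ := ih ((List.range pos.length).foldl
          (fun s i => if String.ofList [c] == pos.getD i "" then s.set i true else s) s)
      constructor
      · rw [ihl, pv_inner_length]
      · intro j hj
        rw [ihg j (by rw [pv_inner_length]; exact hj),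
            pv_inner_getD _ _ _ _ hj, List.any_cons, Bool.or_assoc]

theorem pvStrip_length (used : String) (pos : List String) : (pvStrip used pos).length = 7 := by
  unfold pvStrip
  rw [(pv_outer pos used.toList (List.replicate 7 false)).1, List.length_replicate]

theorem pvStrip_getD (used : String) (pos : List String) (j : Nat) (h : j < 7) :
    (pvStrip used pos).getD j false = pvBit used pos j := by
  unfold pvStrip pvBit
  rw [(pv_outer pos used.toList (List.replicate 7 false)).2 j (by simpa using h)]
  rw [show (List.replicate 7 false).getD j false = false from by
        rw [List.getD_eq_getElem _ _ (by simpa using h), List.getElem_replicate],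
      Bool.false_or]
  by_cases hn : j < pos.length
  · simp [hn]
  · simp [hn]

theorem pvActive_mem (used : String) (pos : List String) (j : Nat) :
    j ∈ pvActive used pos ↔ pvBit used pos j = true := by
  unfold pvActive pvBit
  simp only [List.mem_filter, List.mem_range, Bool.and_eq_true, decide_eq_true_eq,
    List.any_eq_true]
  constructor
  · rintro ⟨hlt, hm⟩
    refine ⟨hlt, ?_⟩
    rcases hl : (pos.getD j "").toList with _ | ⟨c, rest⟩
    · rw [hl] at hm; exact absurd hm (by simp)
    · rcases rest with _ | ⟨d, rest⟩
      · rw [hl] at hm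
        refine ⟨c, by simpa using hm, ?_⟩
        rw [beq_iff_eq, ← hl, String.ofList_toList]
      · rw [hl] at hm; exact absurd hm (by simp)
  · rintro ⟨hlt, c, hc, he⟩
    refine ⟨hlt, ?_⟩
    rw [beq_iff_eq] at he
    rw [← he, String.toList_ofList]
    simpa using hc

theorem pv_pre_iff (used : String) (pos : List String) :
    Pre_drawDigit used pos ↔
      ∀ i < pos.length, 7 ≤ i → ∀ c ∈ used.toList, pos.getD i "" ≠ String.ofList [c] := by
  unfold Pre_drawDigit
  simp only [List.all_eq_true, List.mem_range, Bool.or_eq_true, Bool.not_eq_true',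
    decide_eq_false_iff_not, Nat.not_le, beq_eq_false_iff_ne, ne_eq]
  constructor
  · intro h i hi h7 c hc
    rcases h i hi with h' | h'
    · omega
    · exact h' c hc
  · intro h i hi
    by_cases h7 : 7 ≤ i
    · exact Or.inr (h i hi h7)
    · exact Or.inl (by omega)

theorem pv_bit_zero (used : String) (pos : List String) (hpre : Pre_drawDigit used pos)
    (j : Nat) (h : 7 ≤ j) : pvBit used pos j = false := by
  rw [pv_pre_iff] at hpre
  unfold pvBit
  by_cases hlt : j < pos.length
  · rw [show decide (j < pos.length) = true from decide_eq_true hlt, Bool.true_and,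
        List.any_eq_false]
    intro c hc
    simp only [Bool.not_eq_true, beq_eq_false_iff_ne, ne_eq]
    exact fun he => hpre j hlt h c hc he.symm
  · rw [show decide (j < pos.length) = false from decide_eq_false hlt, Bool.false_and]

theorem pv_key (used : String) (pos : List String) (hpre : Pre_drawDigit used pos)
    (p : List Nat) (hp : ∀ x ∈ p, x < 7) :
    onlyNums p (pvStrip used pos) = pvSetEq p (pvActive used pos) := by
  rw [Bool.eq_iff_iff]
  unfold onlyNums pvSetEq
  simp only [Bool.and_eq_true, List.all_eq_true, List.mem_range, pvStrip_length,
    List.contains_iff_mem, Bool.or_eq_true, Bool.not_eq_eq_eq_not, Bool.not_true]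
  constructor
  · rintro ⟨h1, h2⟩
    constructor
    · intro x hx
      rw [pvActive_mem, ← pvStrip_getD used pos x (hp x hx)]
      exact h2 x hx
    · intro x hx
      rw [pvActive_mem] at hx
      by_cases hx7 : x < 7
      · rcases h1 x hx7 with h | h
        · rw [pvStrip_getD used pos x hx7, hx] at h
          exact absurd h (by simp)
        · exact h
      · exfalso
        rw [pv_bit_zero used pos hpre x (by omega)] at hx
        exact Bool.false_ne_true hx
  · rintro ⟨h1, h2⟩
    constructor
    · intro i hi
      by_cases hm : i ∈ p
      · exact Or.inr hm
      · left
        rw [pvStrip_getD used pos i hi]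
        cases hb : pvBit used pos i
        · rfl
        · exact absurd (h2 i ((pvActive_mem used pos i).mpr hb)) hm
    · intro x hx
      rw [pvStrip_getD used pos x (hp x hx), ← pvActive_mem]
      exact h1 x hx

-- ===== VERDICT (by name: the statement is the Claim_ definition above) =====
theorem drawDigit_spec : Claim_equal_drawDigit := by
  intro used pos _ hpre
  unfold Spec_drawDigit drawDigit drawDigit_alt
  simp only [pvSegTable, List.find?_cons, List.find?_nil]
  have k := fun p hp => (pv_key used pos hpre p hp).symm
  rw [k [0,1,2,4,5,6] (by decide), k [2,5] (by decide), k [0,2,3,4,6] (by decide),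
      k [0,2,3,5,6] (by decide), k [1,2,3,5] (by decide), k [0,1,3,5,6] (by decide),
      k [0,1,3,4,5,6] (by decide), k [0,2,5] (by decide), k [0,1,2,3,4,5,6] (by decide),
      k [0,1,2,3,5,6] (by decide)]
  by_cases h1 : onlyNums [0,1,2,4,5,6] (pvStrip used pos) = true
  · simp [h1]
  by_cases h2 : onlyNums [2,5] (pvStrip used pos) = true
  · simp [h1, h2]
  by_cases h3 : onlyNums [0,2,3,4,6] (pvStrip used pos) = true
  · simp [h1, h2, h3]
  by_cases h4 : onlyNums [0,2,3,5,6] (pvStrip used pos) = true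
  · simp [h1, h2, h3, h4]
  by_cases h5 : onlyNums [1,2,3,5] (pvStrip used pos) = true
  · simp [h1, h2, h3, h4, h5]
  by_cases h6 : onlyNums [0,1,3,5,6] (pvStrip used pos) = true
  · simp [h1, h2, h3, h4, h5, h6]
  by_cases h7 : onlyNums [0,1,3,4,5,6] (pvStrip used pos) = true
  · simp [h1, h2, h3, h4, h5, h6, h7]
  by_cases h8 : onlyNums [0,2,5] (pvStrip used pos) = true
  · simp [h1, h2, h3, h4, h5, h6, h7, h8]
  by_cases h9 : onlyNums [0,1,2,3,4,5,6] (pvStrip used pos) = true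
  · simp [h1, h2, h3, h4, h5, h6, h7, h8, h9]
  by_cases h10 : onlyNums [0,1,2,3,5,6] (pvStrip used pos) = true
  · simp [h1, h2, h3, h4, h5, h6, h7, h8, h9, h10]
  · simp [h1, h2, h3, h4, h5, h6, h7, h8, h9, h10]
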